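-- pv_equiv track=rewrite | github.com/bastia93/DSAlgo_codes | Graph/Batches.py | solve
-- ===== SOURCE A (Python) =====
-- def solve(students: int, strength: list[int], relation: list[list[int]], criteria: int) -> int:
--     parent = [i for i in range(students)]
--
--     def find_parent(node):
--         if parent[node] == node:
--             return node
--         else:
--             parent[node] = find_parent(parent[node])
--             return parent[node]
--
--     for i, j in relation:
--         parent_i = find_parent(i - 1)
--         parent_j = find_parent(j - 1)
--
--         parent[parent_j] = parent_i
--
--     for i in range(students):
--         parent[i] = find_parent(i)
--
--     hm = {}
--
--     for i in range(students):
--         if parent[i] not in hm: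
--             hm[parent[i]] = 0
--         hm[parent[i]] += strength[i]
--
--     ans = 0
--
--     for i in hm:
--         if hm[i] >= criteria:
--             ans += 1
--
--     return ans
-- ===== SOURCE B (Python) =====
-- def solve(students: int, strength: list[int], relation: list[list[int]], criteria: int) -> int:
--     # Merge-by-relabeling ("coloring") instead of a union-find forest:
--     # every vertex carries a group label; an edge merges two groups by
--     # rewriting one label into the other across the whole array.
--     labels = list(range(students))
--     for i, j in relation:
--         a = labels[i - 1]
--         b = labels[j - 1]
--         if a != b:
--             labels = [a if l == b else l for l in labels]
--     sums = {}
--     for k in range(students):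
--         lab = labels[k]
--         sums[lab] = sums.get(lab, 0) + strength[k]
--     return sum(1 for v in sums.values() if v >= criteria)
-- ===== Notes on version B (the rewrite author's own statement) =====
-- stated objective: simpler
-- what changed: Replaces the union-find forest with recursive path compression by flat group labels merged via whole-array relabeling, and the conditional dict initialisation plus key-iteration count by dict.get accumulation and a values() generator sum.
import Mathlib
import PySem

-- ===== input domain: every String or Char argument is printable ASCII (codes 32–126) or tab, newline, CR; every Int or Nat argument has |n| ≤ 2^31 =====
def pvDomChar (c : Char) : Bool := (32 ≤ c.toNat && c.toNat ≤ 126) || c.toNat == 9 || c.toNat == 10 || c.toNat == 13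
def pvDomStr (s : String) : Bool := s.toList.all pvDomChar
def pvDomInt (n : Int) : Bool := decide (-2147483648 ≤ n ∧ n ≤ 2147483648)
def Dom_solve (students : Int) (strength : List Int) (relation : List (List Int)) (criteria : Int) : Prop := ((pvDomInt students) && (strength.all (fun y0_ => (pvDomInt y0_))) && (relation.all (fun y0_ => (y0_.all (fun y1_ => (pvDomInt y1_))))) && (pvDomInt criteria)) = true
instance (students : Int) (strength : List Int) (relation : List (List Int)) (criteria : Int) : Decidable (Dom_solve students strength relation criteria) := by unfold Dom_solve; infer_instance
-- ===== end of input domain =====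

-- B replaces A's union-find forest (recursive find with path compression) by flat group
-- labels merged through whole-array relabeling; objective: a genuinely different algorithm
-- of similar size (not claimed faster). Neither side mutates its arguments observably.

-- ===== PORT A =====
-- find_parent of A, with fuel bounding the recursion depth (the chain to the root visits
-- distinct nodes, so fuel = len(parent) + 2 is never exhausted on inputs admitted by
-- Pre_solve; the pyGetD default is likewise never read there).
def findP : Nat → List Int → Int → Int × List Int
  | 0, parent, _ => (0, parent)
  | f + 1, parent, node =>
    let v := PySem.List.pyGetD parent node 0
    if v = node then (node, parent)
    else
      let r := findP f parent v
      (r.1, PySem.List.pySetD r.2 node r.1)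

-- body of A's `for i, j in relation` loop
def stepEdgeA (fuel : Nat) (parent : List Int) (row : List Int) : List Int :=
  let i := PySem.List.pyGetD row 0 0
  let j := PySem.List.pyGetD row 1 0
  let r1 := findP fuel parent (i - 1)
  let r2 := findP fuel r1.2 (j - 1)
  PySem.List.pySetD r2.2 r2.1 r1.1

-- body of A's `for i in range(students): parent[i] = find_parent(i)` loop
def stepRootA (fuel : Nat) (parent : List Int) (i : Int) : List Int :=
  let r := findP fuel parent i
  PySem.List.pySetD r.2 i r.1

-- body of A's dict-building loop
def stepSumA (parent2 strength : List Int) (d : PySem.Dict Int Int) (i : Int) : PySem.Dict Int Int :=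
  let k := PySem.List.pyGetD parent2 i 0
  let d1 := if ¬ d.contains k then d.insert k 0 else d
  d1.insert k (d1.getD k 0 + PySem.List.pyGetD strength i 0)

def solve (students : Int) (strength : List Int) (relation : List (List Int)) (criteria : Int) : Int :=
  let parent0 := PySem.List.pyRange 0 students 1
  let fuel := parent0.length + 2
  let parent1 := relation.foldl (stepEdgeA fuel) parent0
  let parent2 := (PySem.List.pyRange 0 students 1).foldl (stepRootA fuel) parent1
  let hm := (PySem.List.pyRange 0 students 1).foldl (stepSumA parent2 strength) PySem.Dict.empty
  hm.keys.foldl (fun ans k => if hm.getD k 0 ≥ criteria then ans + 1 else ans) 0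

-- ===== PORT B =====
-- body of B's edge loop: merge the two groups by relabeling b-labelled entries to a
def stepEdgeB (labels : List Int) (row : List Int) : List Int :=
  let a := PySem.List.pyGetD labels (PySem.List.pyGetD row 0 0 - 1) 0
  let b := PySem.List.pyGetD labels (PySem.List.pyGetD row 1 0 - 1) 0
  if a ≠ b then labels.map (fun l => if l = b then a else l) else labels

-- body of B's sums loop: sums[lab] = sums.get(lab, 0) + strength[k]
def stepSumB (labels strength : List Int) (d : PySem.Dict Int Int) (k : Int) : PySem.Dict Int Int :=
  let lab := PySem.List.pyGetD labels k 0
  d.insert lab (d.getD lab 0 + PySem.List.pyGetD strength k 0)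

def solve_alt (students : Int) (strength : List Int) (relation : List (List Int)) (criteria : Int) : Int :=
  let labels0 := PySem.List.pyRange 0 students 1
  let labels := relation.foldl stepEdgeB labels0
  let sums := (PySem.List.pyRange 0 students 1).foldl (stepSumB labels strength) PySem.Dict.empty
  (sums.values.map (fun v => if v ≥ criteria then (1 : Int) else 0)).sum

-- ===== PRECONDITION & SPEC =====
-- Exactly the inputs where Python A returns: strength must be indexable up to students-1,
-- every relation row must unpack as a pair, and each endpoint decremented by one must be a
-- valid (possibly negative) Python index into the parent list.
def Pre_solve (students : Int) (strength : List Int) (relation : List (List Int)) (criteria : Int) : Prop :=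
  students ≤ (strength.length : Int) ∧
  ∀ row ∈ relation, row.length = 2 ∧ ∀ x ∈ row, PySem.Raise.InRange students.toNat (x - 1)

instance (students : Int) (strength : List Int) (relation : List (List Int)) (criteria : Int) : Decidable (Pre_solve students strength relation criteria) := by unfold Pre_solve PySem.Raise.InRange; infer_instance

def pvWitness_solve : Int × List Int × List (List Int) × Int := (4, [1, 2, 3, 4], [[1, 2], [3, 3]], 3)

def Spec_solve (students : Int) (strength : List Int) (relation : List (List Int)) (criteria : Int) (out : Int) : Prop := out = solve_alt students strength relation criteria
instance (students : Int) (strength : List Int) (relation : List (List Int)) (criteria : Int) (out : Int) : Decidable (Spec_solve students strength relation criteria out) := by unfold Spec_solve; infer_instance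

-- ===== CLAIM (what is proved, stated in full; the proofs are below) =====
def Claim_equal_solve : Prop := ∀ (students : Int) (strength : List Int) (relation : List (List Int)) (criteria : Int), Dom_solve students strength relation criteria → Pre_solve students strength relation criteria → Spec_solve students strength relation criteria (solve students strength relation criteria)

-- ===== LEMMAS AND PROOFS =====

-- abstract forest model: pvGm reads the parent list as a function on Nat
def pvGm (p : List Int) : Nat → Nat := fun k => (p.getD k 0).toNat
def pvRt (n : Nat) (g : Nat → Nat) (k : Nat) : Nat := g^[n] k
def pvBdd (n : Nat) (g : Nat → Nat) : Prop := ∀ k, k < n → g k < n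
def pvAcyc (n : Nat) (g : Nat → Nat) : Prop := ∀ m, m < n → ∀ c, 0 < c → g^[c] m = m → g m = m
def pvUF (n : Nat) (p : List Int) : Prop :=
  p.length = n ∧ (∀ k, k < n → 0 ≤ p.getD k 0) ∧ pvBdd n (pvGm p) ∧ pvAcyc n (pvGm p)
def pvNIdx (n : Nat) (i : Int) : Nat := (if i < 0 then i + n else i).toNat

lemma pvGetD_set (p : List Int) (x : Nat) (v : Int) (k : Nat) (hx : x < p.length) :
    (p.set x v).getD k 0 = if k = x then v else p.getD k 0 := by
  by_cases h : k = x
  · subst h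
    simp [List.getD_eq_getElem?_getD, hx]
  · simp [List.getD_eq_getElem?_getD, List.getElem?_set_ne (by omega : x ≠ k), h]

lemma pvGm_set {p : List Int} {x r : Nat} (hx : x < p.length) :
    pvGm (p.set x ((r : Nat) : Int)) = Function.update (pvGm p) x r := by
  funext k
  show ((p.set x ((r : Nat) : Int)).getD k 0).toNat = Function.update (pvGm p) x r k
  rw [pvGetD_set _ _ _ _ hx]
  by_cases h : k = x
  · subst h; rw [if_pos rfl, Function.update_self]; simp
  · rw [if_neg h, Function.update_of_ne h]; rfl

lemma pvIterLt {n : Nat} {g : Nat → Nat} (hb : pvBdd n g) {k : Nat} (hk : k < n) (d : Nat) :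
    g^[d] k < n := by
  induction d with
  | zero => simpa using hk
  | succ d ih => rw [Function.iterate_succ_apply']; exact hb _ ih

lemma pvRtFix {n : Nat} {g : Nat → Nat} (hb : pvBdd n g) (ha : pvAcyc n g) {k : Nat} (hk : k < n) :
    g (pvRt n g k) = pvRt n g k := by
  have hlt : ∀ t : Fin (n + 1), g^[(t : Nat)] k < n := fun t => pvIterLt hb hk t
  obtain ⟨t1, t2, hne, heq⟩ :=
    Fintype.exists_ne_map_eq_of_card_lt (fun t : Fin (n + 1) => (⟨g^[(t : Nat)] k, hlt t⟩ : Fin n))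
      (by simp)
  have hkey : ∃ a b : Nat, a < b ∧ b ≤ n ∧ g^[a] k = g^[b] k := by
    rcases lt_or_gt_of_ne (Fin.val_ne_of_ne hne) with h | h
    · exact ⟨t1, t2, h, Nat.lt_succ_iff.mp t2.isLt, congrArg Fin.val heq⟩
    · exact ⟨t2, t1, h, Nat.lt_succ_iff.mp t1.isLt, (congrArg Fin.val heq).symm⟩
  obtain ⟨a, b, hab, hbn, he⟩ := hkey
  have hm : g^[b - a] (g^[a] k) = g^[a] k := by
    rw [← Function.iterate_add_apply, Nat.sub_add_cancel (le_of_lt hab), ← he]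
  have hfix : g (g^[a] k) = g^[a] k :=
    ha _ (pvIterLt hb hk a) (b - a) (by omega) hm
  have hsplit : g^[n] k = g^[a] k := by
    have h1 : g^[(n - a) + a] k = g^[n - a] (g^[a] k) := Function.iterate_add_apply g (n - a) a k
    rw [Nat.sub_add_cancel (by omega : a ≤ n)] at h1
    rw [h1, Function.iterate_fixed hfix]
  unfold pvRt
  rw [hsplit]; exact hfix

lemma pvRtLt {n : Nat} {g : Nat → Nat} (hb : pvBdd n g) {k : Nat} (hk : k < n) : pvRt n g k < n :=
  pvIterLt hb hk n

lemma pvRtReach {n : Nat} {g : Nat → Nat} (hb : pvBdd n g) (ha : pvAcyc n g) {k r : Nat} {d : Nat}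
    (hk : k < n) (h : g^[d] k = r) (hf : g r = r) : pvRt n g k = r := by
  unfold pvRt
  rcases le_total d n with hd | hd
  · have h1 : g^[(n - d) + d] k = g^[n - d] (g^[d] k) := Function.iterate_add_apply g (n - d) d k
    rw [Nat.sub_add_cancel hd] at h1
    rw [h1, h, Function.iterate_fixed hf]
  · have h2 : g^[(d - n) + n] k = g^[d - n] (g^[n] k) := Function.iterate_add_apply g (d - n) n k
    rw [Nat.sub_add_cancel hd] at h2
    have hfixn : g (g^[n] k) = g^[n] k := pvRtFix hb ha hk
    rw [Function.iterate_fixed hfixn] at h2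
    rw [← h, h2]

lemma pvRtStep {n : Nat} {g : Nat → Nat} (hb : pvBdd n g) (ha : pvAcyc n g) {k : Nat} (hk : k < n) :
    pvRt n g (g k) = pvRt n g k := by
  apply pvRtReach hb ha (hb _ hk) (d := n)
  · rw [← Function.iterate_succ_apply]
    rw [Function.iterate_succ_apply']
    exact pvRtFix hb ha hk
  · exact pvRtFix hb ha hk

lemma pvAcycReach {n : Nat} {g' : Nat → Nat}
    (h : ∀ m, m < n → ∃ d t, g'^[d] m = t ∧ g' t = t) : pvAcyc n g' := by
  intro m hm c hc hcyc
  obtain ⟨d, t, hd, ht⟩ := h m hm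
  have hper : ∀ j : Nat, g'^[j * c] m = m := by
    intro j
    induction j with
    | zero => simp
    | succ j ih =>
      have hje : (j + 1) * c = c + j * c := by ring
      rw [hje, Function.iterate_add_apply, ih, hcyc]
  have hN : g'^[(d + 1) * c] m = m := hper (d + 1)
  have hge : d ≤ (d + 1) * c := by nlinarith
  have hsp : g'^[((d + 1) * c - d) + d] m = g'^[(d + 1) * c - d] (g'^[d] m) :=
    Function.iterate_add_apply g' _ d m
  rw [Nat.sub_add_cancel hge, hN, hd, Function.iterate_fixed ht] at hsp
  have hmt : m = t := hsp
  rw [hmt]; exact ht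

lemma pvReachCompress {n : Nat} {g : Nat → Nat} (hb : pvBdd n g) (ha : pvAcyc n g) {x : Nat}
    (hx : x < n) :
    ∀ (d k : Nat), k < n → g (g^[d] k) = g^[d] k →
      ∃ d', (Function.update g x (pvRt n g x))^[d'] k = g^[d] k ∧
        Function.update g x (pvRt n g x) (g^[d] k) = g^[d] k := by
  have hfixgen : ∀ t, g t = t → Function.update g x (pvRt n g x) t = t := by
    intro t hft
    by_cases htx : t = x
    · subst htx
      have hrt : pvRt n g t = t := by unfold pvRt; exact Function.iterate_fixed hft n
      rw [Function.update_self, hrt]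
    · rw [Function.update_of_ne htx]; exact hft
  intro d
  induction d with
  | zero =>
    intro k hk hfix
    simp only [Function.iterate_zero, id] at hfix ⊢
    exact ⟨0, rfl, hfixgen k hfix⟩
  | succ d ih =>
    intro k hk hfix
    by_cases hk0 : g k = k
    · have hkf : g^[d + 1] k = k := Function.iterate_fixed hk0 (d + 1)
      rw [hkf] at hfix ⊢
      exact ⟨0, rfl, hfixgen k hk0⟩
    · by_cases hkx : k = x
      · subst hkx
        have hrt : pvRt n g k = g^[d + 1] k := pvRtReach hb ha hx rfl hfix
        refine ⟨1, ?_, hfixgen _ hfix⟩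
        simp only [Function.iterate_one]
        rw [Function.update_self, hrt]
      · have hgk : g k < n := hb _ hk
        rw [Function.iterate_succ_apply] at hfix ⊢
        obtain ⟨d', h1, h2⟩ := ih (g k) hgk hfix
        refine ⟨d' + 1, ?_, h2⟩
        rw [Function.iterate_succ_apply, Function.update_of_ne hkx]
        exact h1

lemma pvReachUnion {n : Nat} {g : Nat → Nat} (hb : pvBdd n g) {x r : Nat}
    (hgx : g x = x) (hgr : g r = r) :
    ∀ (d k : Nat), k < n → g (g^[d] k) = g^[d] k →
      ∃ d', (Function.update g x r)^[d'] k = (if g^[d] k = x then r else g^[d] k) ∧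
        Function.update g x r (if g^[d] k = x then r else g^[d] k) =
          (if g^[d] k = x then r else g^[d] k) := by
  have hfixr : Function.update g x r r = r := by
    by_cases hrx : r = x
    · subst hrx; rw [Function.update_self]
    · rw [Function.update_of_ne hrx]; exact hgr
  have hfixgen : ∀ t, g t = t →
      Function.update g x r (if t = x then r else t) = (if t = x then r else t) := by
    intro t hft
    by_cases htx : t = x
    · subst htx; rw [if_pos rfl]; exact hfixr
    · rw [if_neg htx, Function.update_of_ne htx]; exact hft
  have hbase : ∀ k, k < n → g k = k →
      ∃ d', (Function.update g x r)^[d'] k = (if k = x then r else k) ∧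
        Function.update g x r (if k = x then r else k) = (if k = x then r else k) := by
    intro k hk hkf
    by_cases hkx : k = x
    · subst hkx
      refine ⟨1, ?_, hfixgen k hkf⟩
      rw [if_pos rfl, Function.iterate_one, Function.update_self]
    · exact ⟨0, by simp [hkx], hfixgen k hkf⟩
  intro d
  induction d with
  | zero =>
    intro k hk hfix
    simp only [Function.iterate_zero, id] at hfix ⊢
    exact hbase k hk hfix
  | succ d ih =>
    intro k hk hfix
    by_cases hk0 : g k = k
    · have hkf : g^[d + 1] k = k := Function.iterate_fixed hk0 (d + 1)
      rw [hkf] at hfix ⊢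
      exact hbase k hk hk0
    · have hkx : k ≠ x := by
        intro h; rw [h] at hk0; exact hk0 hgx
      have hgk : g k < n := hb _ hk
      rw [Function.iterate_succ_apply] at hfix ⊢
      obtain ⟨d', h1, h2⟩ := ih (g k) hgk hfix
      refine ⟨d' + 1, ?_, h2⟩
      rw [Function.iterate_succ_apply, Function.update_of_ne hkx]
      exact h1

lemma pvUpdCompress {n : Nat} {g : Nat → Nat} (hb : pvBdd n g) (ha : pvAcyc n g) {x : Nat}
    (hx : x < n) :
    pvBdd n (Function.update g x (pvRt n g x)) ∧ pvAcyc n (Function.update g x (pvRt n g x)) ∧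
      ∀ k, k < n → pvRt n (Function.update g x (pvRt n g x)) k = pvRt n g k := by
  have hb' : pvBdd n (Function.update g x (pvRt n g x)) := by
    intro k hk
    by_cases hkx : k = x
    · subst hkx; rw [Function.update_self]; exact pvRtLt hb hx
    · rw [Function.update_of_ne hkx]; exact hb _ hk
  have hreach := pvReachCompress hb ha hx
  have ha' : pvAcyc n (Function.update g x (pvRt n g x)) := by
    apply pvAcycReach
    intro m hm
    obtain ⟨d', h1, h2⟩ := hreach n m hm (pvRtFix hb ha hm)
    exact ⟨d', g^[n] m, h1, h2⟩
  refine ⟨hb', ha', ?_⟩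
  intro k hk
  obtain ⟨d', h1, h2⟩ := hreach n k hk (pvRtFix hb ha hk)
  exact pvRtReach hb' ha' hk h1 h2

lemma pvUpdUnion {n : Nat} {g : Nat → Nat} (hb : pvBdd n g) (ha : pvAcyc n g) {x r : Nat}
    (hx : x < n) (hgx : g x = x) (hr : r < n) (hgr : g r = r) :
    pvBdd n (Function.update g x r) ∧ pvAcyc n (Function.update g x r) ∧
      ∀ k, k < n → pvRt n (Function.update g x r) k =
        (if pvRt n g k = x then r else pvRt n g k) := by
  have hb' : pvBdd n (Function.update g x r) := by
    intro k hk
    by_cases hkx : k = x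
    · subst hkx; rw [Function.update_self]; exact hr
    · rw [Function.update_of_ne hkx]; exact hb _ hk
  have hreach := pvReachUnion hb hgx hgr (n := n)
  have ha' : pvAcyc n (Function.update g x r) := by
    apply pvAcycReach
    intro m hm
    obtain ⟨d', h1, h2⟩ := hreach n m hm (pvRtFix hb ha hm)
    exact ⟨d', _, h1, h2⟩
  refine ⟨hb', ha', ?_⟩
  intro k hk
  obtain ⟨d', h1, h2⟩ := hreach n k hk (pvRtFix hb ha hk)
  exact pvRtReach hb' ha' hk h1 h2

lemma pvSetCompress {n : Nat} {p : List Int} (h : pvUF n p) {x : Nat} (hx : x < n) :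
    pvUF n (p.set x ((pvRt n (pvGm p) x : Nat) : Int)) ∧
      ∀ k, k < n →
        pvRt n (pvGm (p.set x ((pvRt n (pvGm p) x : Nat) : Int))) k = pvRt n (pvGm p) k := by
  obtain ⟨hlen, hpos, hb, ha⟩ := h
  have hxl : x < p.length := by omega
  have hgm := pvGm_set (p := p) (x := x) (r := pvRt n (pvGm p) x) hxl
  obtain ⟨hb', ha', hrt⟩ := pvUpdCompress hb ha hx
  refine ⟨⟨by simpa using hlen, ?_, by rw [hgm]; exact hb', by rw [hgm]; exact ha'⟩, ?_⟩
  · intro k hk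
    rw [pvGetD_set _ _ _ _ hxl]
    by_cases hkx : k = x
    · simp [hkx]
    · simp only [if_neg hkx]; exact hpos _ hk
  · intro k hk; rw [hgm]; exact hrt k hk

lemma pvSetUnion {n : Nat} {p : List Int} (h : pvUF n p) {x r : Nat} (hx : x < n)
    (hgx : pvGm p x = x) (hr : r < n) (hgr : pvGm p r = r) :
    pvUF n (p.set x ((r : Nat) : Int)) ∧
      ∀ k, k < n → pvRt n (pvGm (p.set x ((r : Nat) : Int))) k =
        (if pvRt n (pvGm p) k = x then r else pvRt n (pvGm p) k) := by
  obtain ⟨hlen, hpos, hb, ha⟩ := h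
  have hxl : x < p.length := by omega
  have hgm := pvGm_set (p := p) (x := x) (r := r) hxl
  obtain ⟨hb', ha', hrt⟩ := pvUpdUnion hb ha hx hgx hr hgr
  refine ⟨⟨by simpa using hlen, ?_, by rw [hgm]; exact hb', by rw [hgm]; exact ha'⟩, ?_⟩
  · intro k hk
    rw [pvGetD_set _ _ _ _ hxl]
    by_cases hkx : k = x
    · simp [hkx]
    · simp only [if_neg hkx]; exact hpos _ hk
  · intro k hk; rw [hgm]; exact hrt k hk

lemma pvGm_cast {n : Nat} {p : List Int} (h : pvUF n p) {k : Nat} (hk : k < n) :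
    p.getD k 0 = ((pvGm p k : Nat) : Int) := by
  obtain ⟨hlen, hpos, _, _⟩ := h
  have h0 := hpos k hk
  unfold pvGm
  omega

lemma pvNIdx_lt {n : Nat} {i : Int} (h : PySem.Raise.InRange n i) : pvNIdx n i < n := by
  obtain ⟨h1, h2⟩ := h
  unfold pvNIdx
  split <;> omega

lemma pvNIdx_natCast {n : Nat} (k : Nat) : pvNIdx n ((k : Nat) : Int) = k := by
  unfold pvNIdx
  split <;> omega

lemma pvGetD_norm {xs : List Int} {i : Int} {d : Int} (h : PySem.Raise.InRange xs.length i) :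
    PySem.List.pyGetD xs i d = xs.getD (pvNIdx xs.length i) d := by
  obtain ⟨h1, h2⟩ := h
  unfold PySem.List.pyGetD PySem.List.pyGet? PySem.List.pyIdx?
  by_cases hneg : 0 ≤ i
  · rw [if_pos hneg, if_pos h2]
    have hidx : i.toNat = pvNIdx xs.length i := by unfold pvNIdx; split <;> omega
    rw [List.getD_eq_getElem?_getD, hidx]
    rfl
  · rw [if_neg hneg, if_pos h1]
    have hidx : xs.length - (-i).toNat = pvNIdx xs.length i := by unfold pvNIdx; split <;> omega
    rw [List.getD_eq_getElem?_getD, hidx]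
    rfl

lemma pvSetD_norm {xs : List Int} {i : Int} {v : Int} (h : PySem.Raise.InRange xs.length i) :
    PySem.List.pySetD xs i v = xs.set (pvNIdx xs.length i) v := by
  obtain ⟨h1, h2⟩ := h
  unfold PySem.List.pySetD PySem.List.pySet? PySem.List.pyIdx?
  by_cases hneg : 0 ≤ i
  · rw [if_pos hneg, if_pos h2]
    simp only [Option.map_some, Option.getD_some]
    congr 1
    unfold pvNIdx
    split <;> omega
  · rw [if_neg hneg, if_pos h1]
    simp only [Option.map_some, Option.getD_some]
    congr 1
    unfold pvNIdx
    split <;> omega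

lemma pvFindFix {n : Nat} {p : List Int} (h : pvUF n p) {u : Nat} (hu : u < n)
    (hfix : pvGm p u = u) {f : Nat} (hf : 1 ≤ f) :
    findP f p ((u : Nat) : Int) = (((u : Nat) : Int), p) := by
  obtain ⟨f', rfl⟩ : ∃ f', f = f' + 1 := ⟨f - 1, by omega⟩
  have hv : PySem.List.pyGetD p ((u : Nat) : Int) 0 = ((u : Nat) : Int) := by
    rw [PySem.List.pyGetD_natCast, pvGm_cast h hu, hfix]
  simp [findP, hv]

lemma pvFindGo {n : Nat} {p : List Int} (h : pvUF n p) :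
    ∀ (d u : Nat), u < n → pvGm p ((pvGm p)^[d] u) = (pvGm p)^[d] u → ∀ f, d + 1 ≤ f →
      (findP f p ((u : Nat) : Int)).1 = ((pvRt n (pvGm p) u : Nat) : Int) ∧
      pvUF n (findP f p ((u : Nat) : Int)).2 ∧
      (∀ k, k < n → pvRt n (pvGm (findP f p ((u : Nat) : Int)).2) k = pvRt n (pvGm p) k) ∧
      (∀ k, k < n → (findP f p ((u : Nat) : Int)).2.getD k 0 = p.getD k 0 ∨
        (findP f p ((u : Nat) : Int)).2.getD k 0 = ((pvRt n (pvGm p) k : Nat) : Int)) := by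
  intro d
  induction d with
  | zero =>
    intro u hu hfix f hf
    simp only [Function.iterate_zero, id] at hfix
    rw [pvFindFix h hu hfix hf]
    have hrt : pvRt n (pvGm p) u = u := by
      unfold pvRt; exact Function.iterate_fixed hfix n
    exact ⟨by rw [hrt], h, fun k _ => rfl, fun k _ => Or.inl rfl⟩
  | succ d ih =>
    intro u hu hfix f hf
    by_cases h0 : pvGm p u = u
    · rw [pvFindFix h hu h0 (by omega)]
      have hrt : pvRt n (pvGm p) u = u := by
        unfold pvRt; exact Function.iterate_fixed h0 n
      exact ⟨by rw [hrt], h, fun k _ => rfl, fun k _ => Or.inl rfl⟩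
    · obtain ⟨f', rfl⟩ : ∃ f', f = f' + 1 := ⟨f - 1, by omega⟩
      have hf' : d + 1 ≤ f' := by omega
      have hv : PySem.List.pyGetD p ((u : Nat) : Int) 0 = ((pvGm p u : Nat) : Int) := by
        rw [PySem.List.pyGetD_natCast, pvGm_cast h hu]
      have hvne : ¬ (((pvGm p u : Nat) : Int) = ((u : Nat) : Int)) := by
        simp only [Int.natCast_inj]; exact h0
      have hfix' : pvGm p ((pvGm p)^[d] (pvGm p u)) = (pvGm p)^[d] (pvGm p u) := by
        rw [← Function.iterate_succ_apply]; exact hfix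
      obtain ⟨ih1, ih2, ih3, ih4⟩ := ih (pvGm p u) (h.2.2.1 _ hu) hfix' f' hf'
      simp only [findP, hv, if_neg hvne]
      have hrtstep : pvRt n (pvGm p) (pvGm p u) = pvRt n (pvGm p) u :=
        pvRtStep h.2.2.1 h.2.2.2 hu
      set p2 := (findP f' p ((pvGm p u : Nat) : Int)).2 with hp2
      have hr1 : (findP f' p ((pvGm p u : Nat) : Int)).1 = ((pvRt n (pvGm p) u : Nat) : Int) := by
        rw [ih1, hrtstep]
      have hrt2u : pvRt n (pvGm p2) u = pvRt n (pvGm p) u := ih3 u hu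
      have hlen2 : p2.length = n := ih2.1
      have hset : PySem.List.pySetD p2 ((u : Nat) : Int) ((pvRt n (pvGm p) u : Nat) : Int) =
          p2.set u ((pvRt n (pvGm p2) u : Nat) : Int) := by
        rw [PySem.List.pySetD_natCast, hrt2u]
      obtain ⟨hUF3, hrt3⟩ := pvSetCompress ih2 (x := u) hu
      refine ⟨hr1, ?_, ?_, ?_⟩
      · simp only [hr1, hset]; exact hUF3
      · intro k hk
        simp only [hr1, hset]
        rw [hrt3 k hk, ih3 k hk]
      · intro k hk
        simp only [hr1, hset]
        rw [pvGetD_set _ _ _ _ (by omega)]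
        by_cases hku : k = u
        · subst hku
          right; simp [hrt2u]
        · rw [if_neg hku]
          exact ih4 k hk

lemma pvFindSpec {n : Nat} {p : List Int} (h : pvUF n p) {node : Int}
    (hin : PySem.Raise.InRange n node) {f : Nat} (hf : n + 2 ≤ f) :
    (findP f p node).1 = ((pvRt n (pvGm p) (pvNIdx n node) : Nat) : Int) ∧
    pvUF n (findP f p node).2 ∧
    (∀ k, k < n → pvRt n (pvGm (findP f p node).2) k = pvRt n (pvGm p) k) ∧
    (∀ k, k < n → (findP f p node).2.getD k 0 = p.getD k 0 ∨
      (findP f p node).2.getD k 0 = ((pvRt n (pvGm p) k : Nat) : Int)) := by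
  obtain ⟨hlo, hhi⟩ := hin
  have hlen := h.1
  by_cases hneg : node < 0
  · set u := pvNIdx n node with hu
    have hult : u < n := pvNIdx_lt ⟨hlo, hhi⟩
    obtain ⟨f', rfl⟩ : ∃ f', f = f' + 1 := ⟨f - 1, by omega⟩
    have hv : PySem.List.pyGetD p node 0 = ((pvGm p u : Nat) : Int) := by
      rw [pvGetD_norm (by rw [hlen]; exact ⟨hlo, hhi⟩)]
      rw [show pvNIdx p.length node = u by rw [hlen]]
      exact pvGm_cast h hult
    have hvne : ¬ (((pvGm p u : Nat) : Int) = node) := by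
      have hnn : (0 : Int) ≤ ((pvGm p u : Nat) : Int) := by positivity
      omega
    have hfixn : pvGm p ((pvGm p)^[n] (pvGm p u)) = (pvGm p)^[n] (pvGm p u) :=
      pvRtFix h.2.2.1 h.2.2.2 (h.2.2.1 _ hult)
    obtain ⟨ih1, ih2, ih3, ih4⟩ := pvFindGo h n (pvGm p u) (h.2.2.1 _ hult) hfixn f' (by omega)
    simp only [findP, hv, if_neg hvne]
    have hrtstep : pvRt n (pvGm p) (pvGm p u) = pvRt n (pvGm p) u :=
      pvRtStep h.2.2.1 h.2.2.2 hult
    set p2 := (findP f' p ((pvGm p u : Nat) : Int)).2 with hp2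
    have hr1 : (findP f' p ((pvGm p u : Nat) : Int)).1 = ((pvRt n (pvGm p) u : Nat) : Int) := by
      rw [ih1, hrtstep]
    have hrt2u : pvRt n (pvGm p2) u = pvRt n (pvGm p) u := ih3 u hult
    have hlen2 : p2.length = n := ih2.1
    have hset : PySem.List.pySetD p2 node ((pvRt n (pvGm p) u : Nat) : Int) =
        p2.set u ((pvRt n (pvGm p2) u : Nat) : Int) := by
      rw [pvSetD_norm (by rw [hlen2]; exact ⟨hlo, hhi⟩), hrt2u]
      congr 1
      rw [hlen2]
    obtain ⟨hUF3, hrt3⟩ := pvSetCompress ih2 (x := u) hult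
    refine ⟨hr1, ?_, ?_, ?_⟩
    · simp only [hr1, hset]; exact hUF3
    · intro k hk
      simp only [hr1, hset]
      rw [hrt3 k hk, ih3 k hk]
    · intro k hk
      simp only [hr1, hset]
      rw [pvGetD_set _ _ _ _ (by omega)]
      by_cases hku : k = u
      · subst hku; right; simp [hrt2u]
      · rw [if_neg hku]; exact ih4 k hk
  · have hu : pvNIdx n node = node.toNat := by unfold pvNIdx; split <;> omega
    have hfixn : pvGm p ((pvGm p)^[n] node.toNat) = (pvGm p)^[n] node.toNat :=
      pvRtFix h.2.2.1 h.2.2.2 (by omega)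
    have hnode : node = ((node.toNat : Nat) : Int) := by omega
    rw [hu, hnode]
    exact pvFindGo h n node.toNat (by omega) hfixn f (by omega)

-- coupling invariant between A's forest and B's labels
def pvInv (n : Nat) (p l : List Int) : Prop :=
  pvUF n p ∧ l.length = n ∧
    ∀ a, a < n → ∀ b, b < n →
      (pvRt n (pvGm p) a = pvRt n (pvGm p) b ↔ l.getD a 0 = l.getD b 0)

lemma pvGetD_map_ite {l : List Int} {a b : Int} {k : Nat} (hk : k < l.length) :
    (l.map (fun v => if v = b then a else v)).getD k 0 =
      (if l.getD k 0 = b then a else l.getD k 0) := by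
  rw [List.getD_eq_getElem _ _ (by simpa using hk), List.getD_eq_getElem _ _ hk]
  simp

lemma pvEdgeStep {n fuel : Nat} (hf : n + 2 ≤ fuel) {p l row : List Int} (hI : pvInv n p l)
    (hlen2 : row.length = 2) (hrow : ∀ x ∈ row, PySem.Raise.InRange n (x - 1)) :
    pvInv n (stepEdgeA fuel p row) (stepEdgeB l row) := by
  obtain ⟨i, j, rfl⟩ := List.length_eq_two.mp hlen2
  obtain ⟨hUF, hllen, cp⟩ := hI
  have hi : PySem.Raise.InRange n (i - 1) := hrow i (by simp)
  have hj : PySem.Raise.InRange n (j - 1) := hrow j (by simp)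
  have hget0 : PySem.List.pyGetD [i, j] 0 0 = i := rfl
  have hget1 : PySem.List.pyGetD [i, j] 1 0 = j := rfl
  set u := pvNIdx n (i - 1) with hudef
  set w := pvNIdx n (j - 1) with hwdef
  have hu : u < n := pvNIdx_lt hi
  have hw : w < n := pvNIdx_lt hj
  obtain ⟨ha1, ha2, ha3, ha4⟩ := pvFindSpec hUF hi hf
  set pA := (findP fuel p (i - 1)).2 with hpA
  obtain ⟨hb1, hb2, hb3, hb4⟩ := pvFindSpec ha2 hj hf
  set pB := (findP fuel pA (j - 1)).2 with hpB
  set rU := pvRt n (pvGm p) u with hrU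
  set rW := pvRt n (pvGm p) w with hrW
  have hrWlt : rW < n := pvRtLt hUF.2.2.1 hw
  have hrUlt : rU < n := pvRtLt hUF.2.2.1 hu
  have hrtBu : pvRt n (pvGm pB) u = rU := by rw [hb3 u hu, ha3 u hu]
  have hrtBw : pvRt n (pvGm pB) w = rW := by rw [hb3 w hw, ha3 w hw]
  have hfixW : pvGm pB rW = rW := by
    have hx := pvRtFix hb2.2.2.1 hb2.2.2.2 hw
    rw [hrtBw] at hx; exact hx
  have hfixU : pvGm pB rU = rU := by
    have hx := pvRtFix hb2.2.2.1 hb2.2.2.2 hu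
    rw [hrtBu] at hx; exact hx
  have hstepA : stepEdgeA fuel p [i, j] = pB.set rW ((rU : Nat) : Int) := by
    show PySem.List.pySetD (findP fuel (findP fuel p (PySem.List.pyGetD [i, j] 0 0 - 1)).2
        (PySem.List.pyGetD [i, j] 1 0 - 1)).2
      (findP fuel (findP fuel p (PySem.List.pyGetD [i, j] 0 0 - 1)).2
        (PySem.List.pyGetD [i, j] 1 0 - 1)).1
      (findP fuel p (PySem.List.pyGetD [i, j] 0 0 - 1)).1 = pB.set rW ((rU : Nat) : Int)
    rw [hget0, hget1, ← hpA, ← hpB, hb1, ha1]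
    have hwn : pvRt n (pvGm pA) (pvNIdx n (j - 1)) = rW := by
      rw [← hwdef, ha3 w hw]
    rw [hwn, PySem.List.pySetD_natCast]
  obtain ⟨hUFn, hrtn⟩ := pvSetUnion hb2 hrWlt hfixW hrUlt hfixU
  have hrtFinal : ∀ k, k < n →
      pvRt n (pvGm (pB.set rW ((rU : Nat) : Int))) k =
        (if pvRt n (pvGm p) k = rW then rU else pvRt n (pvGm p) k) := by
    intro k hk
    rw [hrtn k hk, hb3 k hk, ha3 k hk]
  have hlab_a : PySem.List.pyGetD l (PySem.List.pyGetD [i, j] 0 0 - 1) 0 = l.getD u 0 := by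
    rw [hget0, pvGetD_norm (by rw [hllen]; exact hi)]
    rw [show pvNIdx l.length (i - 1) = u by rw [hllen]]
  have hlab_b : PySem.List.pyGetD l (PySem.List.pyGetD [i, j] 1 0 - 1) 0 = l.getD w 0 := by
    rw [hget1, pvGetD_norm (by rw [hllen]; exact hj)]
    rw [show pvNIdx l.length (j - 1) = w by rw [hllen]]
  have hcpW : ∀ y, y < n → (pvRt n (pvGm p) y = rW ↔ l.getD y 0 = l.getD w 0) := by
    intro y hy; exact cp y hy w hw
  have hcpU : ∀ y, y < n → (pvRt n (pvGm p) y = rU ↔ l.getD y 0 = l.getD u 0) := by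
    intro y hy; exact cp y hy u hu
  by_cases hab : l.getD u 0 = l.getD w 0
  · -- groups already equal: B leaves labels unchanged; A's union is the identity on roots
    have hB : stepEdgeB l [i, j] = l := by
      show (if PySem.List.pyGetD l (PySem.List.pyGetD [i, j] 0 0 - 1) 0 ≠
          PySem.List.pyGetD l (PySem.List.pyGetD [i, j] 1 0 - 1) 0 then _ else l) = l
      rw [hlab_a, hlab_b, if_neg (by simpa using hab)]
    have hUW : rU = rW := (cp u hu w hw).mpr hab
    refine ⟨by rw [hstepA]; exact hUFn, by rw [hB]; exact hllen, ?_⟩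
    intro a haa b hbb
    rw [hstepA, hB, hrtFinal a haa, hrtFinal b hbb]
    have hsame : ∀ y, y < n →
        (if pvRt n (pvGm p) y = rW then rU else pvRt n (pvGm p) y) = pvRt n (pvGm p) y := by
      intro y hy
      split
      · rename_i hcase; rw [hUW, ← hcase]
      · rfl
    rw [hsame a haa, hsame b hbb]
    exact cp a haa b hbb
  · have hB : stepEdgeB l [i, j] =
        l.map (fun v => if v = l.getD w 0 then l.getD u 0 else v) := by
      unfold stepEdgeB
      rw [hlab_a, hlab_b, if_pos (by simpa using hab)]
    have hUW : rU ≠ rW := fun hcon => hab ((cp u hu w hw).mp hcon)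
    refine ⟨by rw [hstepA]; exact hUFn, by rw [hB]; simpa using hllen, ?_⟩
    intro a haa b hbb
    rw [hstepA, hB, hrtFinal a haa, hrtFinal b hbb]
    rw [pvGetD_map_ite (by omega), pvGetD_map_ite (by omega)]
    have hWa := hcpW a haa
    have hWb := hcpW b hbb
    have hUa := hcpU a haa
    have hUb := hcpU b hbb
    have hcpab := cp a haa b hbb
    by_cases h1 : pvRt n (pvGm p) a = rW <;> by_cases h2 : pvRt n (pvGm p) b = rW
    · rw [if_pos h1, if_pos h2, if_pos (hWa.mp h1), if_pos (hWb.mp h2)]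
      simp
    · rw [if_pos h1, if_neg h2, if_pos (hWa.mp h1),
        if_neg (fun hc => h2 (hWb.mpr hc))]
      constructor
      · intro hc; exact (hUb.mp hc.symm).symm
      · intro hc; exact (hUb.mpr hc.symm).symm
    · rw [if_neg h1, if_pos h2, if_neg (fun hc => h1 (hWa.mpr hc)), if_pos (hWb.mp h2)]
      constructor
      · intro hc; exact hUa.mp hc
      · intro hc; exact hUa.mpr hc
    · rw [if_neg h1, if_neg h2, if_neg (fun hc => h1 (hWa.mpr hc)),
        if_neg (fun hc => h2 (hWb.mpr hc))]
      exact hcpab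

-- generic pairwise foldl preserving a relation between the two states
lemma pvFoldPair {α : Type} {P : List Int → List Int → Prop} {fa : List Int → α → List Int}
    {fb : List Int → α → List Int} :
    ∀ (rel : List α) (p l : List Int), P p l →
      (∀ p' l' x, x ∈ rel → P p' l' → P (fa p' x) (fb l' x)) →
      P (rel.foldl fa p) (rel.foldl fb l) := by
  intro rel
  induction rel with
  | nil => intro p l h _; simpa using h
  | cons x rest ih =>
    intro p l h hstep
    simp only [List.foldl_cons]
    exact ih _ _ (hstep p l x (by simp) h) (fun p' l' y hy h' => hstep p' l' y (by simp [hy]) h')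

lemma pvLoop2 {n fuel : Nat} (hf : n + 2 ≤ fuel) :
    ∀ (l : List Nat) (p : List Int), pvUF n p → (∀ i ∈ l, i < n) →
      pvUF n (l.foldl (fun q i => stepRootA fuel q ((i : Nat) : Int)) p) ∧
      (∀ k, k < n →
        pvRt n (pvGm (l.foldl (fun q i => stepRootA fuel q ((i : Nat) : Int)) p)) k =
          pvRt n (pvGm p) k) ∧
      (∀ k, k ∈ l →
        (l.foldl (fun q i => stepRootA fuel q ((i : Nat) : Int)) p).getD k 0 =
          ((pvRt n (pvGm p) k : Nat) : Int)) ∧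
      (∀ k, k < n →
        (l.foldl (fun q i => stepRootA fuel q ((i : Nat) : Int)) p).getD k 0 = p.getD k 0 ∨
        (l.foldl (fun q i => stepRootA fuel q ((i : Nat) : Int)) p).getD k 0 =
          ((pvRt n (pvGm p) k : Nat) : Int)) := by
  intro l
  induction l with
  | nil =>
    intro p hUF _
    exact ⟨hUF, fun k _ => rfl, fun k hk => absurd hk (by simp), fun k _ => Or.inl rfl⟩
  | cons i rest ih =>
    intro p hUF hmem
    have hi : i < n := hmem i (by simp)
    have hin : PySem.Raise.InRange n ((i : Nat) : Int) := ⟨by omega, by omega⟩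
    obtain ⟨f1, f2, f3, f4⟩ := pvFindSpec hUF hin hf
    set pF := (findP fuel p ((i : Nat) : Int)).2 with hpF
    have hlenF : pF.length = n := f2.1
    have hq1 : stepRootA fuel p ((i : Nat) : Int) =
        pF.set i ((pvRt n (pvGm pF) i : Nat) : Int) := by
      show PySem.List.pySetD (findP fuel p ((i : Nat) : Int)).2 ((i : Nat) : Int)
          (findP fuel p ((i : Nat) : Int)).1 = pF.set i ((pvRt n (pvGm pF) i : Nat) : Int)
      rw [f1, pvNIdx_natCast, ← hpF, PySem.List.pySetD_natCast, f3 i hi]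
    obtain ⟨hUF1, hrt1⟩ := pvSetCompress f2 (x := i) hi
    have hrtq1 : ∀ k, k < n →
        pvRt n (pvGm (pF.set i ((pvRt n (pvGm pF) i : Nat) : Int))) k = pvRt n (pvGm p) k := by
      intro k hk; rw [hrt1 k hk, f3 k hk]
    have hentry_i : (pF.set i ((pvRt n (pvGm pF) i : Nat) : Int)).getD i 0 =
        ((pvRt n (pvGm p) i : Nat) : Int) := by
      rw [pvGetD_set _ _ _ _ (by omega), if_pos rfl, f3 i hi]
    have hentry : ∀ k, k < n →
        (pF.set i ((pvRt n (pvGm pF) i : Nat) : Int)).getD k 0 = p.getD k 0 ∨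
        (pF.set i ((pvRt n (pvGm pF) i : Nat) : Int)).getD k 0 =
          ((pvRt n (pvGm p) k : Nat) : Int) := by
      intro k hk
      rw [pvGetD_set _ _ _ _ (by omega)]
      by_cases hki : k = i
      · subst hki; right; simp [f3 k hk]
      · rw [if_neg hki]; exact f4 k hk
    obtain ⟨g1, g2, g3, g4⟩ := ih (pF.set i ((pvRt n (pvGm pF) i : Nat) : Int)) hUF1
      (fun y hy => hmem y (by simp [hy]))
    simp only [List.foldl_cons, hq1]
    refine ⟨g1, ?_, ?_, ?_⟩
    · intro k hk; rw [g2 k hk, hrtq1 k hk]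
    · intro k hk
      rcases List.mem_cons.mp hk with hki | hkr
    -- k = i or k ∈ rest
      · subst hki
        rcases g4 k hi with hcase | hcase
        · rw [hcase, hentry_i]
        · rw [hcase, hrtq1 k hi]
      · rw [g3 k hkr, hrtq1 k (hmem k (by simp [hkr]))]
    · intro k hk
      rcases g4 k hk with hcase | hcase
      · rcases hentry k hk with h2 | h2
        · left; rw [hcase, h2]
        · right; rw [hcase, h2]
      · right; rw [hcase, hrtq1 k hk]

-- the two-insert body of A's dict loop equals B's single-insert body
lemma pvStepSumA_eq {p2 st : List Int} {d : PySem.Dict Int Int} {k : Int} :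
    stepSumA p2 st d k =
      d.insert (PySem.List.pyGetD p2 k 0)
        (d.getD (PySem.List.pyGetD p2 k 0) 0 + PySem.List.pyGetD st k 0) := by
  unfold stepSumA
  by_cases hc : (d.contains (PySem.List.pyGetD p2 k 0)) = true
  · simp only [hc, not_true_eq_false, if_false]
  · have hc' : d.contains (PySem.List.pyGetD p2 k 0) = false := by
      simpa using hc
    simp only [hc', Bool.false_eq_true, not_false_eq_true, if_true]
    rw [PySem.Dict.getD_insert_self, PySem.Dict.insert_insert_self,
      PySem.Dict.getD_of_not_contains d 0 hc']

lemma pvGsum {F w : Nat → Int} :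
    ∀ (l : List Nat) (d : PySem.Dict Int Int) (c : Int),
      (l.foldl (fun d k => d.insert (F k) (d.getD (F k) 0 + w k)) d).getD c 0 =
        d.getD c 0 + ((l.filter (fun k => F k == c)).map w).sum := by
  intro l
  induction l with
  | nil => intro d c; simp
  | cons k rest ih =>
    intro d c
    simp only [List.foldl_cons, List.filter_cons]
    rw [ih]
    by_cases hc : F k = c
    · simp only [hc, beq_self_eq_true, if_true, List.map_cons, List.sum_cons]
      rw [PySem.Dict.getD_insert, if_pos rfl]
      ring
    · have hb : (F k == c) = false := by simpa using hc
      simp only [hb, Bool.false_eq_true, if_false]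
      rw [PySem.Dict.getD_insert, if_neg (fun hcc => hc hcc.symm)]

lemma pvCountAdd {f g2 : Nat → Int} {P Q : Int → Bool} :
    ∀ (l : List Nat) (s t : List Int),
      (∀ k ∈ l, (f k ∈ s ↔ g2 k ∈ t)) → s.countP P = t.countP Q →
      (∀ a ∈ l, ∀ b ∈ l, (f a = f b ↔ g2 a = g2 b)) → (∀ k ∈ l, P (f k) = Q (g2 k)) →
      (List.foldl PySem.Set.add s (l.map f)).countP P =
        (List.foldl PySem.Set.add t (l.map g2)).countP Q := by
  intro l
  induction l with
  | nil => intro s t _ h _ _; simpa using h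
  | cons k rest ih =>
    intro s t hmem hcnt hfg hPQ
    simp only [List.map_cons, List.foldl_cons]
    have hk := hmem k (by simp)
    by_cases hks : f k ∈ s
    · have hkt : g2 k ∈ t := hk.mp hks
      have hs : PySem.Set.add s (f k) = s := by
        unfold PySem.Set.add
        rw [if_pos (by simpa using hks)]
      have ht : PySem.Set.add t (g2 k) = t := by
        unfold PySem.Set.add
        rw [if_pos (by simpa using hkt)]
      rw [hs, ht]
      exact ih s t (fun y hy => hmem y (by simp [hy])) hcnt
        (fun a ha b hb => hfg a (by simp [ha]) b (by simp [hb]))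
        (fun y hy => hPQ y (by simp [hy]))
    · have hkt : g2 k ∉ t := fun hc => hks (hk.mpr hc)
      have hs : PySem.Set.add s (f k) = s ++ [f k] := by
        unfold PySem.Set.add
        rw [if_neg (by simpa using hks)]
      have ht : PySem.Set.add t (g2 k) = t ++ [g2 k] := by
        unfold PySem.Set.add
        rw [if_neg (by simpa using hkt)]
      rw [hs, ht]
      apply ih
      · intro y hy
        simp only [List.mem_append, List.mem_singleton]
        constructor
        · rintro (h | h)
          · left; exact (hmem y (by simp [hy])).mp h
          · right; exact (hfg y (by simp [hy]) k (by simp)).mp h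
        · rintro (h | h)
          · left; exact (hmem y (by simp [hy])).mpr h
          · right; exact (hfg y (by simp [hy]) k (by simp)).mpr h
      · simp only [List.countP_append, List.countP_cons, List.countP_nil]
        rw [hcnt, hPQ k (by simp)]
      · exact fun a ha b hb => hfg a (by simp [ha]) b (by simp [hb])
      · exact fun y hy => hPQ y (by simp [hy])


-- B's sums-loop body, let-expanded
lemma pvStepSumB_eq {L st : List Int} {d : PySem.Dict Int Int} {k : Int} :
    stepSumB L st d k =
      d.insert (PySem.List.pyGetD L k 0)
        (d.getD (PySem.List.pyGetD L k 0) 0 + PySem.List.pyGetD st k 0) := rfl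

-- the grouping dict both programs build, keyed by a representative function read off a list
def pvHA (n : Nat) (P2 strength : List Int) : PySem.Dict Int Int :=
  (List.range n).foldl
    (fun d k => d.insert (P2.getD k 0) (d.getD (P2.getD k 0) 0 + strength.getD k 0))
    PySem.Dict.empty

lemma pvCountFold (crit : Int) (D : Int → Int) (l : List Int) :
    l.foldl (fun ans k => if D k ≥ crit then ans + 1 else ans) (0 : Int) =
      ((l.countP (fun k => decide (D k ≥ crit)) : Nat) : Int) := by
  have h := PySem.List.foldl_count_if (fun k => decide (D k ≥ crit)) l 0
  simpa using h

lemma pvSumFold (crit : Int) (l : List Int) :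
    (l.map (fun v => if v ≥ crit then (1 : Int) else 0)).sum =
      ((l.countP (fun v => decide (v ≥ crit)) : Nat) : Int) := by
  have h := PySem.List.sum_map_ite_one_zero (fun v => decide (v ≥ crit)) l
  simpa using h

-- final counting phase: two representative functions inducing the same partition of
-- range n give the same number of groups with strength sum at least the criterion
lemma pvFinal (n : Nat) (P2 L strength : List Int) (criteria : Int)
    (hcouple : ∀ a, a < n → ∀ b, b < n →
      (P2.getD a 0 = P2.getD b 0 ↔ L.getD a 0 = L.getD b 0)) :
    (pvHA n P2 strength).keys.foldl
        (fun ans k => if (pvHA n P2 strength).getD k 0 ≥ criteria then ans + 1 else ans)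
        (0 : Int) =
      ((pvHA n L strength).values.map (fun v => if v ≥ criteria then (1 : Int) else 0)).sum := by
  have hKA : (pvHA n P2 strength).keys =
      List.foldl PySem.Set.add [] ((List.range n).map (fun k => P2.getD k 0)) := by
    unfold pvHA
    rw [PySem.Dict.keys_foldl_insert_key (List.range n) (fun k => P2.getD k 0)
      (fun d k => d.getD (P2.getD k 0) 0 + strength.getD k 0) PySem.Dict.empty,
      PySem.Dict.keys_empty]
    rfl
  have hKB : (pvHA n L strength).keys =
      List.foldl PySem.Set.add [] ((List.range n).map (fun k => L.getD k 0)) := by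
    unfold pvHA
    rw [PySem.Dict.keys_foldl_insert_key (List.range n) (fun k => L.getD k 0)
      (fun d k => d.getD (L.getD k 0) 0 + strength.getD k 0) PySem.Dict.empty,
      PySem.Dict.keys_empty]
    rfl
  have hNA : (pvHA n P2 strength).keys.Nodup := by
    unfold pvHA
    exact PySem.Dict.nodup_keys_foldl_insert_key _ _ _ _ PySem.Dict.nodup_keys_empty
  have hNB : (pvHA n L strength).keys.Nodup := by
    unfold pvHA
    exact PySem.Dict.nodup_keys_foldl_insert_key _ _ _ _ PySem.Dict.nodup_keys_empty
  have hGA : ∀ c, (pvHA n P2 strength).getD c 0 =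
      (((List.range n).filter (fun j => P2.getD j 0 == c)).map (fun j => strength.getD j 0)).sum := by
    intro c
    unfold pvHA
    rw [pvGsum]
    simp [PySem.Dict.getD_empty]
  have hGB : ∀ c, (pvHA n L strength).getD c 0 =
      (((List.range n).filter (fun j => L.getD j 0 == c)).map (fun j => strength.getD j 0)).sum := by
    intro c
    unfold pvHA
    rw [pvGsum]
    simp [PySem.Dict.getD_empty]
  rw [pvCountFold criteria (fun k => (pvHA n P2 strength).getD k 0) (pvHA n P2 strength).keys]
  rw [pvSumFold criteria (pvHA n L strength).values]
  rw [PySem.Dict.values_eq_map_keys (pvHA n L strength) hNB 0, List.countP_map]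
  rw [hKA, hKB]
  have hfg : ∀ a ∈ List.range n, ∀ b ∈ List.range n,
      ((fun k : Nat => P2.getD k 0) a = (fun k : Nat => P2.getD k 0) b ↔
        (fun k : Nat => L.getD k 0) a = (fun k : Nat => L.getD k 0) b) := by
    intro a ha b hb
    exact hcouple a (List.mem_range.mp ha) b (List.mem_range.mp hb)
  have hPQ : ∀ k ∈ List.range n,
      (fun c => decide ((pvHA n P2 strength).getD c 0 ≥ criteria)) ((fun k : Nat => P2.getD k 0) k) =
      ((fun v => decide (v ≥ criteria)) ∘ (fun c => (pvHA n L strength).getD c 0))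
        ((fun k : Nat => L.getD k 0) k) := by
    intro k hk
    have hkk := List.mem_range.mp hk
    have hfilter : (List.range n).filter (fun j => P2.getD j 0 == P2.getD k 0) =
        (List.range n).filter (fun j => L.getD j 0 == L.getD k 0) := by
      apply List.filter_congr
      intro j hj
      have hiff := hcouple j (List.mem_range.mp hj) k hkk
      rw [Bool.eq_iff_iff]
      simp only [beq_iff_eq]
      exact hiff
    have hsum : (pvHA n P2 strength).getD (P2.getD k 0) 0 =
        (pvHA n L strength).getD (L.getD k 0) 0 := by
      rw [hGA, hGB, hfilter]
    simp only [Function.comp]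
    rw [hsum]
  exact congrArg (fun m : Nat => (m : Int))
    (pvCountAdd (List.range n) [] [] (by simp) rfl hfg hPQ)

lemma pvRangeGetD {students : Int} {k : Nat} (hk : k < students.toNat) :
    (PySem.List.pyRange 0 students 1).getD k 0 = ((k : Nat) : Int) := by
  have hlen : (PySem.List.pyRange 0 students 1).length = students.toNat := by
    rw [PySem.List.length_pyRange_one]; simp
  rw [List.getD_eq_getElem _ _ (by omega)]
  rw [PySem.List.getElem_pyRange_one]
  simp

lemma pvInitUF {students : Int} : pvUF students.toNat (PySem.List.pyRange 0 students 1) := by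
  have hlen : (PySem.List.pyRange 0 students 1).length = students.toNat := by
    rw [PySem.List.length_pyRange_one]; simp
  have hfix : ∀ k, k < students.toNat → pvGm (PySem.List.pyRange 0 students 1) k = k := by
    intro k hk
    unfold pvGm
    rw [pvRangeGetD hk]
    simp
  refine ⟨hlen, ?_, ?_, ?_⟩
  · intro k hk; rw [pvRangeGetD hk]; positivity
  · intro k hk; rw [hfix k hk]; exact hk
  · intro m hm c hc hcyc; exact hfix m hm

lemma pvInitRt {students : Int} {k : Nat} (hk : k < students.toNat) :
    pvRt students.toNat (pvGm (PySem.List.pyRange 0 students 1)) k = k := by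
  unfold pvRt
  apply Function.iterate_fixed
  unfold pvGm
  rw [pvRangeGetD hk]
  simp

-- ===== VERDICT (by name: the statement is the Claim_ definition above) =====
theorem solve_spec : Claim_equal_solve := by
  unfold Claim_equal_solve
  intro students strength relation criteria hDom hPre
  unfold Spec_solve
  obtain ⟨hstr, hrel⟩ := hPre
  -- initial structures
  have hlen0 : (PySem.List.pyRange 0 students 1).length = students.toNat := by
    rw [PySem.List.length_pyRange_one]; simp
  have hfuel : students.toNat + 2 ≤ (PySem.List.pyRange 0 students 1).length + 2 := by omega
  have hinv0 : pvInv students.toNat (PySem.List.pyRange 0 students 1)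
      (PySem.List.pyRange 0 students 1) := by
    refine ⟨pvInitUF, hlen0, ?_⟩
    intro a ha b hb
    rw [pvInitRt ha, pvInitRt hb, pvRangeGetD ha, pvRangeGetD hb]
    exact ⟨fun h => by exact_mod_cast h, fun h => by exact_mod_cast h⟩
  have hinv1 : pvInv students.toNat
      (relation.foldl (stepEdgeA ((PySem.List.pyRange 0 students 1).length + 2))
        (PySem.List.pyRange 0 students 1))
      (relation.foldl stepEdgeB (PySem.List.pyRange 0 students 1)) := by
    apply pvFoldPair relation _ _ hinv0
    intro p' l' row hr hI
    exact pvEdgeStep hfuel hI (hrel row hr).1 (hrel row hr).2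
  obtain ⟨hUF1, hlenL, cp1⟩ := hinv1
  -- second loop of A
  have hrange : PySem.List.pyRange 0 students 1 =
      (List.range students.toNat).map (fun k => ((k : Nat) : Int)) := by
    rw [PySem.List.pyRange_zero]
  obtain ⟨hUF2, hrt2, hmem2, hor2⟩ :=
    pvLoop2 (fuel := (PySem.List.pyRange 0 students 1).length + 2) hfuel
      (List.range students.toNat)
      (relation.foldl (stepEdgeA ((PySem.List.pyRange 0 students 1).length + 2))
        (PySem.List.pyRange 0 students 1))
      hUF1 (fun i hi => List.mem_range.mp hi)
  -- name the raw states
  have hfA : ∀ k, k < students.toNat →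
      ((List.range students.toNat).foldl
        (fun q i => stepRootA ((PySem.List.pyRange 0 students 1).length + 2) q ((i : Nat) : Int))
        (relation.foldl (stepEdgeA ((PySem.List.pyRange 0 students 1).length + 2))
          (PySem.List.pyRange 0 students 1))).getD k 0 =
      ((pvRt students.toNat
        (pvGm (relation.foldl (stepEdgeA ((PySem.List.pyRange 0 students 1).length + 2))
          (PySem.List.pyRange 0 students 1))) k : Nat) : Int) :=
    fun k hk => hmem2 k (List.mem_range.mpr hk)
  have hcouple : ∀ a, a < students.toNat → ∀ b, b < students.toNat →
      (((List.range students.toNat).foldl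
        (fun q i => stepRootA ((PySem.List.pyRange 0 students 1).length + 2) q ((i : Nat) : Int))
        (relation.foldl (stepEdgeA ((PySem.List.pyRange 0 students 1).length + 2))
          (PySem.List.pyRange 0 students 1))).getD a 0 =
       ((List.range students.toNat).foldl
        (fun q i => stepRootA ((PySem.List.pyRange 0 students 1).length + 2) q ((i : Nat) : Int))
        (relation.foldl (stepEdgeA ((PySem.List.pyRange 0 students 1).length + 2))
          (PySem.List.pyRange 0 students 1))).getD b 0 ↔
       (relation.foldl stepEdgeB (PySem.List.pyRange 0 students 1)).getD a 0 =
       (relation.foldl stepEdgeB (PySem.List.pyRange 0 students 1)).getD b 0) := by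
    intro a ha b hb
    rw [hfA a ha, hfA b hb]
    constructor
    · intro h; exact (cp1 a ha b hb).mp (by exact_mod_cast h)
    · intro h
      exact_mod_cast congrArg (fun t : Nat => (t : Int)) ((cp1 a ha b hb).mpr h)
  -- rewrite A's second loop into the range-n fold used above
  have hP2eq : (PySem.List.pyRange 0 students 1).foldl
      (stepRootA ((PySem.List.pyRange 0 students 1).length + 2))
      (relation.foldl (stepEdgeA ((PySem.List.pyRange 0 students 1).length + 2))
        (PySem.List.pyRange 0 students 1)) =
      (List.range students.toNat).foldl
        (fun q i => stepRootA ((PySem.List.pyRange 0 students 1).length + 2) q ((i : Nat) : Int))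
        (relation.foldl (stepEdgeA ((PySem.List.pyRange 0 students 1).length + 2))
          (PySem.List.pyRange 0 students 1)) := by
    conv_lhs => rw [hrange]
    rw [List.foldl_map, ← hrange]
  -- both dict folds are pvHA of the respective representative list
  have hHMA : ∀ (P2 : List Int),
      (PySem.List.pyRange 0 students 1).foldl (stepSumA P2 strength) PySem.Dict.empty =
        pvHA students.toNat P2 strength := by
    intro P2
    rw [hrange, List.foldl_map]
    unfold pvHA
    have hfun : (fun (d : PySem.Dict Int Int) (k : Nat) => stepSumA P2 strength d ((k : Nat) : Int)) =
        (fun d k => d.insert (P2.getD k 0) (d.getD (P2.getD k 0) 0 + strength.getD k 0)) := by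
      funext d k
      rw [pvStepSumA_eq]
      simp only [PySem.List.pyGetD_natCast]
    rw [hfun]
  have hHMB :
      (PySem.List.pyRange 0 students 1).foldl
        (stepSumB (relation.foldl stepEdgeB (PySem.List.pyRange 0 students 1)) strength)
        PySem.Dict.empty =
        pvHA students.toNat (relation.foldl stepEdgeB (PySem.List.pyRange 0 students 1)) strength := by
    rw [hrange, List.foldl_map, ← hrange]
    unfold pvHA
    have hfun : (fun (d : PySem.Dict Int Int) (k : Nat) =>
        stepSumB (relation.foldl stepEdgeB (PySem.List.pyRange 0 students 1)) strength d ((k : Nat) : Int)) =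
        (fun d k => d.insert ((relation.foldl stepEdgeB (PySem.List.pyRange 0 students 1)).getD k 0)
          (d.getD ((relation.foldl stepEdgeB (PySem.List.pyRange 0 students 1)).getD k 0) 0 +
            strength.getD k 0)) := by
      funext d k
      rw [pvStepSumB_eq]
      simp only [PySem.List.pyGetD_natCast]
    rw [hfun]
  show solve students strength relation criteria = solve_alt students strength relation criteria
  simp only [solve, solve_alt]
  rw [hP2eq, hHMA, hHMB]
  exact pvFinal students.toNat _ _ strength criteria hcouple
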